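-- pv_equiv track=rewrite | github.com/tomasramos/smf-mass-ban-tool | smf_mass_email_ban_generator.py | combinations_with_dots
-- ===== SOURCE A (Python) =====
-- from itertools import product
--
-- def combinations_with_dots(string_value, suffix=""):
--     n = len(string_value)
--     positions = n - 1
--
--     for combo in product([False, True], repeat=positions):
--         result = string_value[0]
--         for i in range(positions):
--             if combo[i]:
--                 result += '.'
--             result += string_value[i + 1]
--         yield result + suffix
-- ===== SOURCE B (Python) =====
-- def combinations_with_dots(string_value, suffix=""):
--     # Recursive decomposition: variants of s = s[0] + variants of s[1:],
--     # without a dot first, then with a dot (itertools.product order).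
--     if len(string_value) == 1:
--         yield string_value + suffix
--         return
--     first = string_value[0]
--     for rest in combinations_with_dots(string_value[1:], suffix):
--         yield first + rest
--     for rest in combinations_with_dots(string_value[1:], suffix):
--         yield first + '.' + rest
-- ===== Notes on version B (the rewrite author's own statement) =====
-- stated objective: simpler
-- what changed: Replaces the itertools.product enumeration of dot-position bitmasks plus an inner index loop by a direct recursion on the string: variants of s are s[0] prefixed (plain, then dotted) to the variants of s[1:].
import Mathlib
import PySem

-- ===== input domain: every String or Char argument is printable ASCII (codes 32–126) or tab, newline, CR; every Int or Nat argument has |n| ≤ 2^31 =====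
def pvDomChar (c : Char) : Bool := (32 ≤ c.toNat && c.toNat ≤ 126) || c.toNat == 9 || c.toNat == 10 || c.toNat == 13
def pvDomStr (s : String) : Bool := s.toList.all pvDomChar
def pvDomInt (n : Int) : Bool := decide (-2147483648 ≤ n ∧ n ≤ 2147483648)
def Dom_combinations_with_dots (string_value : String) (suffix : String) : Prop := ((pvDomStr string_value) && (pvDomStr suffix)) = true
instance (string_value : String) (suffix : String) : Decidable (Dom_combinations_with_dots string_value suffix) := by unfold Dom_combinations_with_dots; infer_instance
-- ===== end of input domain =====

-- B replaces A's product-of-bitmasks enumeration by a direct recursion on the string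
-- (objective: simpler). Equivalence of the generators' yielded sequences, as lists.

-- ===== PORT A =====
-- product([False, True], repeat=k): first factor varies slowest, False before True.
def pvProduct : Nat → List (List Bool)
  | 0 => [[]]
  | k + 1 => [false, true].flatMap (fun b => (pvProduct k).map (b :: ·))

-- the body of A's outer loop: result = s[0]; for i in range(positions): …  (over List Char)
def pvBuildA (cs : List Char) (combo : List Bool) : List Char :=
  (List.range (cs.length - 1)).foldl
    (fun result i => (if combo[i]! then result ++ ['.'] else result) ++ [cs[i + 1]!])
    [cs[0]!]

def combinations_with_dots (string_value : String) (suffix : String) : List String :=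
  (pvProduct (string_value.toList.length - 1)).map
    (fun combo => String.mk (pvBuildA string_value.toList combo ++ suffix.toList))

-- ===== PORT B =====
-- B's recursion over the characters: base case one char; otherwise the head is
-- prefixed plainly to each tail variant, then with a dot to each tail variant.
def pvAltAux : List Char → List Char → List (List Char)
  | [], _ => []            -- B raises IndexError here; outside Pre_
  | [c], suf => [c :: suf]
  | c :: d :: rest, suf =>
      (pvAltAux (d :: rest) suf).map (c :: ·)
        ++ (pvAltAux (d :: rest) suf).map (fun r => c :: '.' :: r)

def combinations_with_dots_alt (string_value : String) (suffix : String) : List String :=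
  (pvAltAux string_value.toList suffix.toList).map String.mk

-- ===== PRECONDITION & SPEC =====
-- Pre_ excludes only the empty string, on which A raises ValueError
-- (product(repeat=-1)) and B raises IndexError.
def Pre_combinations_with_dots (string_value : String) (suffix : String) : Prop :=
  string_value ≠ ""
instance (string_value : String) (suffix : String) : Decidable (Pre_combinations_with_dots string_value suffix) := by unfold Pre_combinations_with_dots; infer_instance
def pvWitness_combinations_with_dots : String × String := ("abc", "@x")

def Spec_combinations_with_dots (string_value : String) (suffix : String) (out : List String) : Prop := out = combinations_with_dots_alt string_value suffix
instance (string_value : String) (suffix : String) (out : List String) : Decidable (Spec_combinations_with_dots string_value suffix out) := by unfold Spec_combinations_with_dots; infer_instance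

-- ===== CLAIM (what is proved, stated in full; the proofs are below) =====
def Claim_equal_combinations_with_dots : Prop := ∀ (string_value : String) (suffix : String), Dom_combinations_with_dots string_value suffix → Pre_combinations_with_dots string_value suffix → Spec_combinations_with_dots string_value suffix (combinations_with_dots string_value suffix)

-- ===== LEMMAS AND PROOFS =====

-- A's inner loop only appends to the accumulator, so a prefix of the seed passes through.
theorem pvBuildA_foldl_prepend (combo : List Bool) (cs : List Char)
    (l : List Nat) (p q : List Char) :
    l.foldl (fun result i => (if combo[i]! then result ++ ['.'] else result) ++ [cs[i + 1]!]) (p ++ q)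
      = p ++ l.foldl (fun result i => (if combo[i]! then result ++ ['.'] else result) ++ [cs[i + 1]!]) q := by
  induction l generalizing q with
  | nil => rfl
  | cons i l ih =>
      simp only [List.foldl_cons]
      rw [← ih]
      congr 1
      split_ifs <;> simp

-- peeling one character and one combo bit off A's builder
theorem pvBuildA_cons (c d : Char) (cs : List Char) (b : Bool) (combo : List Bool) :
    pvBuildA (c :: d :: cs) (b :: combo)
      = (if b then [c, '.'] else [c]) ++ pvBuildA (d :: cs) combo := by
  unfold pvBuildA
  simp only [List.length_cons, Nat.add_sub_cancel]
  rw [List.range_succ_eq_map, List.foldl_cons, List.foldl_map]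
  have hstep :
      (fun (result : List Char) (i : Nat) =>
          (if (b :: combo)[i + 1]! then result ++ ['.'] else result) ++ [(c :: d :: cs)[i + 1 + 1]!])
        = fun (result : List Char) (i : Nat) =>
          (if combo[i]! then result ++ ['.'] else result) ++ [(d :: cs)[i + 1]!] := by
    funext r i
    simp
  have hinit :
      (if (b :: combo)[0]! then ([(c :: d :: cs)[0]!] : List Char) ++ ['.'] else [(c :: d :: cs)[0]!]) ++ [(c :: d :: cs)[0 + 1]!]
        = (if b then [c, '.'] else [c]) ++ [(d :: cs)[0]!] := by
    simp only [List.getElem!_cons_zero, List.getElem!_cons_succ]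
    split_ifs <;> simp
  rw [hstep, hinit, pvBuildA_foldl_prepend]

-- main characterisation: A's enumeration equals B's recursion, for nonempty input
theorem pvMain (cs : List Char) (suf : List Char) (h : cs ≠ []) :
    (pvProduct (cs.length - 1)).map (fun combo => pvBuildA cs combo ++ suf)
      = pvAltAux cs suf := by
  induction cs with
  | nil => exact absurd rfl h
  | cons c rest ih =>
      cases rest with
      | nil => simp [pvProduct, pvAltAux, pvBuildA]
      | cons d rest' =>
        have hlen : (c :: d :: rest').length - 1 = ((d :: rest').length - 1) + 1 := by simp
        rw [hlen]
        have ihtail := ih (by simp)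
        simp only [pvProduct, List.flatMap_cons, List.flatMap_nil, List.append_nil,
          List.map_append, List.map_map, pvAltAux]
        rw [← ihtail]
        simp only [List.map_map]
        congr 1 <;>
        · apply List.map_congr_left
          intro combo _
          simp [Function.comp, pvBuildA_cons]

-- ===== VERDICT (by name: the statement is the Claim_ definition above) =====
theorem combinations_with_dots_spec : Claim_equal_combinations_with_dots := by
  intro s suf _ hpre
  unfold Spec_combinations_with_dots combinations_with_dots combinations_with_dots_alt
  have hne : s.toList ≠ [] := by
    intro hnil
    simp [String.toList_eq_nil_iff] at hnil; exact hpre hnil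
  rw [← pvMain s.toList suf.toList hne]
  simp [List.map_map, Function.comp]
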